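-- pv_equiv track=rewrite | github.com/Hwang-Junsu/Coding_Test | mvc2/Programmers/Python/Lv.3/숫자 게임.py | solution
-- ===== SOURCE A (Python) =====
-- def solution(A, B):
--     answer = -1
--
--     A.sort(reverse = True)
--     B.sort(reverse = True)
--     count = 0
--     for b in B :
--         for a in A :
--             if b > a :
--                 A.remove(a)
--                 count += 1
--                 break
--         else :
--             break
--
--
--     answer = count
--     return answer
-- ===== SOURCE B (Python) =====
-- def solution(A, B):
--     # One-pass two-pointer greedy over both lists sorted descending:
--     # each b takes the largest remaining a it beats; stop when the current
--     # (largest remaining) b beats nothing.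
--     # Note: unlike A, this does not sort the caller's lists in place.
--     sa = sorted(A, reverse=True)
--     sb = sorted(B, reverse=True)
--     j = 0
--     count = 0
--     for b in sb:
--         while j < len(sa) and sa[j] >= b:
--             j += 1
--         if j == len(sa):
--             break
--         count += 1
--         j += 1
--     return count
-- ===== Notes on version B (the rewrite author's own statement) =====
-- stated objective: faster
-- what changed: replaces A's per-b rescan of the list plus list.remove with a single advancing pointer over the descending-sorted list (two-pointer greedy), removing the inner scan entirely
import Mathlib
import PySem

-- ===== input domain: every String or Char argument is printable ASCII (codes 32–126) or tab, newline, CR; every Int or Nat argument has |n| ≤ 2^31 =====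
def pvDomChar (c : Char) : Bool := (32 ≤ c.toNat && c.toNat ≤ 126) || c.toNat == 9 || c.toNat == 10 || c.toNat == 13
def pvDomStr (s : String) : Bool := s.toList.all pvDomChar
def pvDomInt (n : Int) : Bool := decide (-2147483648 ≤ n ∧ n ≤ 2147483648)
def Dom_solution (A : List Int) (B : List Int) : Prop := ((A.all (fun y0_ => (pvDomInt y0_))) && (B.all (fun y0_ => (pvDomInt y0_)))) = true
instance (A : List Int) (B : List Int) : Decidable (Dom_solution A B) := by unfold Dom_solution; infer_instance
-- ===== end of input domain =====

-- B replaces A's per-b rescan + list.remove with a single advancing pointer over the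
-- descending-sorted lists (two-pointer greedy): faster. A sorts its arguments in place;
-- B does not — the equivalence proved here is about the return value.

-- ===== PORT A =====
-- inner 'for a in A: if b > a: … break': first a of the list with b > a, or none
def findBeat (b : Int) : List Int → Option Int
  | [] => none
  | a :: rest => if b > a then some a else findBeat b rest

-- outer 'for b in B' with for-else: break ends the whole loop
def loopA : List Int → List Int → Int → Int
  | _, [], count => count
  | as, b :: bs, count =>
    match findBeat b as with
    | some a => loopA ((PySem.List.remove? as a).getD as) bs (count + 1)
      -- A.remove(a): a was found in as, so remove? is some and getD never defaults
    | none => count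

def solution (A : List Int) (B : List Int) : Int :=
  loopA (PySem.List.sorted A (fun x => x) true) (PySem.List.sorted B (fun x => x) true) 0

-- ===== PORT B =====
-- 'while j < len(sa) and sa[j] >= b: j += 1' (index is guarded in range, so getD is exact)
def skipGE (sa : List Int) (b : Int) (j : Nat) : Nat :=
  if h : j < sa.length then
    if b ≤ sa.getD j 0 then skipGE sa b (j + 1) else j
  else j
termination_by sa.length - j

def loopB (sa : List Int) : List Int → Nat → Int → Int
  | [], _, count => count
  | b :: bs, j, count =>
    let j' := skipGE sa b j
    if j' = sa.length then count
    else loopB sa bs (j' + 1) (count + 1)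

def solution_alt (A : List Int) (B : List Int) : Int :=
  loopB (PySem.List.sorted A (fun x => x) true) (PySem.List.sorted B (fun x => x) true) 0 0

-- ===== PRECONDITION & SPEC =====
def Spec_solution (A : List Int) (B : List Int) (out : Int) : Prop := out = solution_alt A B
instance (A : List Int) (B : List Int) (out : Int) : Decidable (Spec_solution A B out) := by unfold Spec_solution; infer_instance

-- ===== CLAIM (what is proved, stated in full; the proofs are below) =====
def Claim_equal_solution : Prop := ∀ (A : List Int) (B : List Int), Dom_solution A B → Spec_solution A B (solution A B)

-- ===== LEMMAS AND PROOFS =====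

-- proof-only middle form: B's loop expressed on the remaining suffix of sa
def loopS : List Int → List Int → Int → Int
  | _, [], count => count
  | suf, b :: bs, count =>
    match suf.dropWhile (fun a => decide (b ≤ a)) with
    | [] => count
    | _ :: suf' => loopS suf' bs (count + 1)

lemma findBeat_eq_head_dropWhile (b : Int) (xs : List Int) :
    findBeat b xs = (xs.dropWhile (fun a => decide (b ≤ a))).head? := by
  induction xs with
  | nil => rfl
  | cons a rest ih =>
    by_cases h : b > a
    · simp [findBeat, h, show ¬ b ≤ a by omega]
    · simp [findBeat, h, show b ≤ a by omega, ih]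

lemma findBeat_append_of_ge (b : Int) (sk suf : List Int) (h : ∀ x ∈ sk, b ≤ x) :
    findBeat b (sk ++ suf) = findBeat b suf := by
  induction sk with
  | nil => rfl
  | cons x sk ih =>
    have hx : b ≤ x := h x (by simp)
    simp only [List.cons_append, findBeat]
    rw [if_neg (by omega)]
    exact ih (fun y hy => h y (by simp [hy]))

lemma remove?_append_of_ne (a : Int) (sk l : List Int) (h : ∀ x ∈ sk, x ≠ a) :
    PySem.List.remove? (sk ++ l) a = (PySem.List.remove? l a).map (sk ++ ·) := by
  induction sk with
  | nil => simp
  | cons x sk ih =>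
    rw [List.cons_append, PySem.List.remove?_cons_of_ne _ (h x (by simp)),
        ih (fun y hy => h y (by simp [hy]))]
    cases PySem.List.remove? l a <;> simp

lemma loopA_eq_loopS (bs : List Int) : ∀ (sk suf : List Int) (count : Int),
    bs.Pairwise (fun x y => y ≤ x) →
    (∀ x ∈ sk, ∀ b ∈ bs, b ≤ x) →
    loopA (sk ++ suf) bs count = loopS suf bs count := by
  induction bs with
  | nil => intro sk suf count _ _; rfl
  | cons b bs ih =>
    intro sk suf count hpair hsk
    have hskb : ∀ x ∈ sk, b ≤ x := fun x hx => hsk x hx b (by simp)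
    have hfb : findBeat b (sk ++ suf) = (suf.dropWhile (fun a => decide (b ≤ a))).head? := by
      rw [findBeat_append_of_ge b sk suf hskb, findBeat_eq_head_dropWhile]
    rcases hdw : suf.dropWhile (fun a => decide (b ≤ a)) with - | ⟨a, suf'⟩
    · simp only [loopA, loopS, hfb, hdw, List.head?_nil]
    · have hpa : ¬ b ≤ a := by
        have := List.dropWhile_get_zero_not (fun a => decide (b ≤ a)) suf
          (by rw [hdw]; simp)
        simpa [hdw] using this
      -- decompose suf along takeWhile/dropWhile
      set tw := suf.takeWhile (fun a => decide (b ≤ a)) with htwdef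
      have hdecomp : suf = tw ++ (a :: suf') := by
        conv_lhs => rw [← List.takeWhile_append_dropWhile (p := fun a => decide (b ≤ a)) (l := suf)]
        rw [hdw]
      have htw : ∀ x ∈ tw, b ≤ x := by
        intro x hx
        have := List.mem_takeWhile_imp hx
        simpa using this
      have hrm : PySem.List.remove? (sk ++ suf) a = some ((sk ++ tw) ++ suf') := by
        rw [hdecomp, ← List.append_assoc]
        rw [remove?_append_of_ne a _ (a :: suf') ?hne]
        · rw [PySem.List.remove?_cons_self]; simp
        case hne =>
          intro x hx
          rcases List.mem_append.mp hx with h1 | h2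
          · have := hskb x h1; omega
          · have := htw x h2; omega
      simp only [loopA, loopS, hfb, hdw, List.head?_cons, hrm, Option.getD_some]
      rw [ih (sk ++ tw) suf' (count + 1)
        (hpair.sublist (List.sublist_cons_self b bs)) ?_]
      intro x hx b' hb'
      rcases List.mem_append.mp hx with h1 | h2
      · exact hsk x h1 b' (by simp [hb'])
      · have h1 := htw x h2
        have h2' := (List.pairwise_cons.mp hpair).1 b' hb'
        omega

lemma skipGE_spec (sa : List Int) (b : Int) : ∀ (n j : Nat), sa.length - j ≤ n → j ≤ sa.length →
    skipGE sa b j ≤ sa.length ∧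
    sa.drop (skipGE sa b j) = (sa.drop j).dropWhile (fun a => decide (b ≤ a)) := by
  intro n
  induction n with
  | zero =>
    intro j hn hj
    have hj' : j = sa.length := by omega
    rw [skipGE, dif_neg (by omega)]
    constructor
    · omega
    · subst hj'; simp
  | succ n ih =>
    intro j hn hj
    by_cases h : j < sa.length
    · have hget : sa.getD j 0 = sa[j] := List.getD_eq_getElem sa 0 h
      have hdrop : sa.drop j = sa[j] :: sa.drop (j + 1) := List.drop_eq_getElem_cons h
      by_cases hb : b ≤ sa[j]
      · rw [skipGE, dif_pos h, if_pos (by rw [hget]; exact hb)]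
        have := ih (j + 1) (by omega) (by omega)
        refine ⟨this.1, ?_⟩
        rw [this.2, hdrop, List.dropWhile_cons, if_pos (by simpa using hb)]
      · rw [skipGE, dif_pos h, if_neg (by rw [hget]; exact hb)]
        refine ⟨by omega, ?_⟩
        rw [hdrop, List.dropWhile_cons, if_neg (by simpa using hb)]
    · rw [skipGE, dif_neg h]
      have hj' : j = sa.length := by omega
      subst hj'
      simp

lemma loopB_eq_loopS (sa : List Int) : ∀ (bs : List Int) (j : Nat) (count : Int),
    j ≤ sa.length → loopB sa bs j count = loopS (sa.drop j) bs count := by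
  intro bs
  induction bs with
  | nil => intro j count _; rfl
  | cons b bs ih =>
    intro j count hj
    have hsp := skipGE_spec sa b sa.length j (by omega) hj
    simp only [loopB, loopS]
    by_cases hend : skipGE sa b j = sa.length
    · rw [if_pos hend]
      have : (sa.drop j).dropWhile (fun a => decide (b ≤ a)) = [] := by
        rw [← hsp.2, hend, List.drop_length]
      rw [this]
    · rw [if_neg hend]
      have hlt : skipGE sa b j < sa.length := lt_of_le_of_ne hsp.1 hend
      have hdrop : sa.drop (skipGE sa b j) = sa[skipGE sa b j] :: sa.drop (skipGE sa b j + 1) :=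
        List.drop_eq_getElem_cons hlt
      have : (sa.drop j).dropWhile (fun a => decide (b ≤ a))
          = sa[skipGE sa b j] :: sa.drop (skipGE sa b j + 1) := by rw [← hsp.2, hdrop]
      rw [this, ih (skipGE sa b j + 1) (count + 1) (by omega)]

-- ===== VERDICT (by name: the statement is the Claim_ definition above) =====
theorem solution_spec : Claim_equal_solution := by
  intro A B _
  unfold Spec_solution solution solution_alt
  rw [loopB_eq_loopS _ _ 0 0 (Nat.zero_le _), List.drop_zero]
  exact loopA_eq_loopS _ [] _ 0
    (by simpa using PySem.List.sorted_pairwise_rev B (fun x => x))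
    (by simp)
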